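-- pv_equiv track=rewrite | github.com/PKUFlyingPig/CS61A | exams/61a-su20-mt/q5/q5.py | subsaltshaker
-- ===== SOURCE A (Python) =====
-- def subsaltshaker(disk):
--     """
--     A 'saltshaker' is a sequence of digits of length `d` composed entirely of the digit `d`. Examples include
--         1
--         4444
--         7777777
--
--     Note that `1 <= d <= 9`; there are no 0-length saltshakers.
--
--     Your task is to implement the `subsaltshaker` function, which takes in an integer `disk` and returns
--         whether `disk` contains a saltshaker as a consecutive subinteger of its digits.
--
--     >>> subsaltshaker(2233) # 22 counts
--     True
--     >>> subsaltshaker(2444423) # 4444 counts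
--     True
--     >>> subsaltshaker(82223) # 22 counts even if it appears as part of 222
--     True
--     >>> subsaltshaker(234562) # 2...2 does not count if the 2s are not consecutive
--     False
--     >>> subsaltshaker(1) # 1 counts
--     True
--     >>> subsaltshaker(498729879871) # 1 counts
--     True
--     >>> subsaltshaker(149872987987) # 1 counts
--     True
--     >>> subsaltshaker(4445555) # no saltshakers in this number
--     False
--     >>> subsaltshaker(20) # no saltshakers in this number
--     False
--     """
--     current_digit = disk%10
--     count = 0
--     while disk:
--         last = disk%10
--         if last == current_digit:
--             count += 1
--         else:
--             count = 1
--             current_digit = last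
--         if current_digit == count:
--             return True
--         disk = disk//10
--     return False
-- ===== SOURCE B (Python) =====
-- def subsaltshaker(disk):
--     groups = []
--     for ch in str(disk):
--         if groups and groups[-1][0] == ch:
--             groups[-1][1] += 1
--         else:
--             groups.append([ch, 1])
--     return any(c.isdigit() and 1 <= int(c) <= n for c, n in groups)
-- ===== Notes on version B (the rewrite author's own statement) =====
-- stated objective: idiomatic
-- what changed: A tracks the current digit and run count incrementally while peeling decimal digits off the integer with floor mod/floor division; B converts the number to its decimal string, run-length-encodes it into (char, run_length) groups with one grouping pass, and then tests whether any group consists of a digit d repeated at least d times.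
-- outside the precondition, e.g. on subsaltshaker(-2494): A returns True, B returns False
import Mathlib
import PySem

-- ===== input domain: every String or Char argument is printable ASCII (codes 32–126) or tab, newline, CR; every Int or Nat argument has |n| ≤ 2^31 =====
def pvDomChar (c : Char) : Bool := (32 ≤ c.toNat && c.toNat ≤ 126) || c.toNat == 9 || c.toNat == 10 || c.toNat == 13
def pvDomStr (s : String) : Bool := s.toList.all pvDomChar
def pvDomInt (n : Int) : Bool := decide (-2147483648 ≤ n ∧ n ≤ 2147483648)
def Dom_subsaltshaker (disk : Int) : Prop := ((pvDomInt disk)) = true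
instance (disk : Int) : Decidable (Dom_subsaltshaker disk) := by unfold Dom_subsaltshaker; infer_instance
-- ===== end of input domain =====

-- B replaces A's incremental run-tracking digit loop by str(disk) + a run-length-encoding
-- grouping pass followed by a test over the groups (idiomatic decomposition, same cost).

-- ===== PORT A =====
-- A's while loop, step for step. The fuel `disk.natAbs + 11` bounds the iteration count
-- of the Python loop on every input: for disk ≥ 0 each step floor-divides by 10 (≤ natAbs
-- steps); for disk < 0 the loop reaches the fixed point of floor division within natAbs steps and then Python's
-- floor mod yields the digit 9 forever, so it returns True within a bounded number of further steps.
def subLoopA : Nat → Int → Int → Int → Bool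
  | 0, _, _, _ => false
  | fuel + 1, disk, current_digit, count =>
    if disk ≠ 0 then
      let last := PySem.Int.mod disk 10
      let count' := if last = current_digit then count + 1 else 1
      let current' := if last = current_digit then current_digit else last
      if current' = count' then true
      else subLoopA fuel (PySem.Int.floordiv disk 10) current' count'
    else false

def subsaltshaker (disk : Int) : Bool :=
  subLoopA (disk.natAbs + 11) disk (PySem.Int.mod disk 10) 0

-- ===== PORT B =====
-- Source B keeps `groups` with the most recent group LAST and mutates groups[-1]; the Lean
-- list keeps the most recent group at the HEAD and reverses at the end (same groups,
-- same order).
def bStep (gs : List (Char × Int)) (ch : Char) : List (Char × Int) :=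
  match gs with
  | (c, k) :: rest => if c = ch then (c, k + 1) :: rest else (ch, 1) :: (c, k) :: rest
  | [] => [(ch, 1)]

def subsaltshaker_alt (disk : Int) : Bool :=
  let groups := ((PySem.Int.toStr disk).toList.foldl bStep []).reverse
  groups.any (fun p =>
    PySem.Chars.isdigit p.1 &&
      (decide (1 ≤ (PySem.Int.ofChars? [p.1]).getD 0) &&
       decide ((PySem.Int.ofChars? [p.1]).getD 0 ≤ p.2)))

-- ===== PRECONDITION & SPEC =====
-- Pre_ excludes negative disk: a digit sequence is only defined for non-negative integers,
-- and there the two programs compute different ad-hoc extensions, neither specified — A scans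
-- the floor-mod expansion of disk, which for negatives ends in infinitely many 9s (so A
-- always returns True there), while B scans str(disk), whose leading '-' starts no run.
def Pre_subsaltshaker (disk : Int) : Prop := 0 ≤ disk
instance (disk : Int) : Decidable (Pre_subsaltshaker disk) := by unfold Pre_subsaltshaker; infer_instance

def pvWitness_subsaltshaker : Int := 2444423

def Spec_subsaltshaker (disk : Int) (out : Bool) : Prop := out = subsaltshaker_alt disk
instance (disk : Int) (out : Bool) : Decidable (Spec_subsaltshaker disk out) := by unfold Spec_subsaltshaker; infer_instance

-- ===== CLAIM (what is proved, stated in full; the proofs are below) =====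
def Claim_equal_subsaltshaker : Prop := ∀ (disk : Int), Dom_subsaltshaker disk → Pre_subsaltshaker disk → Spec_subsaltshaker disk (subsaltshaker disk)

-- ===== LEMMAS AND PROOFS =====

-- A's loop read as a function of the LSB-first digit list of disk.
def aListN : List Nat → Int → Int → Bool
  | [], _, _ => false
  | d :: l, current_digit, count =>
    let last : Int := (d : Int)
    let count' := if last = current_digit then count + 1 else 1
    let current' := if last = current_digit then current_digit else last
    if current' = count' then true else aListN l current' count'

-- Run-length encoding of a digit list, first group at the head.
def rleN : List Nat → List (Nat × Int)
  | [] => []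
  | d :: l =>
    match rleN l with
    | (c, k) :: gs => if c = d then (c, k + 1) :: gs else (d, 1) :: (c, k) :: gs
    | [] => [(d, 1)]

def predN (p : Nat × Int) : Bool := decide (1 ≤ (p.1 : Int)) && decide ((p.1 : Int) ≤ p.2)

-- A's state (current_digit, count) folded over the remaining groups.
def pendAny (cur count : Int) : List (Nat × Int) → Bool
  | [] => false
  | (c, k) :: gs =>
    if (c : Int) = cur then (decide (count < cur ∧ cur ≤ count + k) || gs.any predN)
    else ((c, k) :: gs).any predN

lemma rleN_counts_pos : ∀ (l : List Nat) (p : Nat × Int), p ∈ rleN l → 1 ≤ p.2 := by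
  intro l
  induction l with
  | nil => simp [rleN]
  | cons d t ih =>
    intro p hp
    simp only [rleN] at hp
    rcases h : rleN t with _ | ⟨⟨c, k⟩, gs⟩
    · rw [h] at hp; simp at hp; simp [hp]
    · rw [h] at hp
      by_cases hcd : c = d
      · simp [hcd] at hp
        rcases hp with h1 | h2
        · have h3 := ih (c, k) (by rw [h]; simp)
          simp at h3
          simp [h1]
          omega
        · exact ih p (by rw [h]; simp [h2])
      · simp [hcd] at hp
        rcases hp with h1 | h2
        · simp [h1]
        · exact ih p (by rw [h]; simp [h2])

lemma rleN_mem_digits : ∀ (l : List Nat) (p : Nat × Int), p ∈ rleN l → p.1 ∈ l := by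
  intro l
  induction l with
  | nil => simp [rleN]
  | cons d t ih =>
    intro p hp
    simp only [rleN] at hp
    rcases h : rleN t with _ | ⟨⟨c, k⟩, gs⟩
    · rw [h] at hp; simp at hp; simp [hp]
    · rw [h] at hp
      by_cases hcd : c = d
      · simp [hcd] at hp
        rcases hp with h1 | h2
        · simp [h1]
        · exact List.mem_cons_of_mem d (ih p (by rw [h]; simp [h2]))
      · simp [hcd] at hp
        rcases hp with h1 | h1 | h2
        · simp [h1]
        · exact List.mem_cons_of_mem d (ih p (by rw [h]; simp [h1]))
        · exact List.mem_cons_of_mem d (ih p (by rw [h]; simp [h2]))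

lemma rleN_head : ∀ (d : Nat) (t : List Nat), ∃ k gs, rleN (d :: t) = (d, k) :: gs ∧ 1 ≤ k := by
  intro d t
  simp only [rleN]
  rcases h : rleN t with _ | ⟨⟨c, k⟩, gs⟩
  · exact ⟨1, [], rfl, le_refl _⟩
  · by_cases hcd : c = d
    · refine ⟨k + 1, gs, by simp [hcd], ?_⟩
      have := rleN_counts_pos t (c, k) (by rw [h]; simp)
      simp at this; omega
    · exact ⟨1, (c, k) :: gs, by simp [hcd], le_refl _⟩

lemma digit_facts : ∀ d : Nat, d < 10 →
    (∀ e : Nat, e < 10 → (Nat.digitChar d = Nat.digitChar e ↔ d = e)) ∧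
    PySem.Chars.isdigit (Nat.digitChar d) = true ∧
    PySem.Int.ofChars? [Nat.digitChar d] = some (d : Int) := by
  decide

lemma aListN_cons_eq (d : Nat) (t : List Nat) (cur count : Int) (hd : (d : Int) = cur) :
    aListN (d :: t) cur count = (decide (cur = count + 1) || aListN t cur (count + 1)) := by
  simp [aListN, hd]

lemma aListN_cons_ne (d : Nat) (t : List Nat) (cur count : Int) (hd : (d : Int) ≠ cur) :
    aListN (d :: t) cur count = (decide ((d : Int) = 1) || aListN t (d : Int) 1) := by
  simp [aListN, hd]

lemma aListN_eq_pendAny : ∀ (l : List Nat) (cur count : Int),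
    aListN l cur count = pendAny cur count (rleN l) := by
  intro l
  induction l with
  | nil => intro cur count; rfl
  | cons d t ih =>
    intro cur count
    rcases h : rleN t with _ | ⟨⟨c, k⟩, gs⟩
    · -- rleN t = []
      have ht : ∀ cur' count', aListN t cur' count' = false := by
        intro cur' count'; rw [ih, h]; rfl
      simp only [rleN, h]
      by_cases hd : (d : Int) = cur
      · rw [aListN_cons_eq d t cur count hd, ht, pendAny, if_pos hd]
        simp only [List.any_nil, Bool.or_false, decide_eq_decide]
        omega
      · rw [aListN_cons_ne d t cur count hd, ht, pendAny, if_neg hd]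
        simp only [List.any_cons, List.any_nil, predN, Bool.or_false, ← Bool.decide_and,
          decide_eq_decide]
        omega
    · -- rleN t = (c,k) :: gs
      have hk : 1 ≤ k := by
        have := rleN_counts_pos t (c, k) (by rw [h]; simp); simpa using this
      simp only [rleN, h]
      by_cases hd : (d : Int) = cur
      · rw [aListN_cons_eq d t cur count hd, ih, h]
        by_cases hcd : c = d
        · subst hcd
          rw [if_pos rfl, pendAny, pendAny, if_pos hd, if_pos hd]
          rcases hgs : gs.any predN
          · simp only [Bool.or_false, ← Bool.decide_or, decide_eq_decide]
            omega
          · simp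
        · have hck : ((c : Int)) ≠ cur := by
            rw [← hd]; exact_mod_cast fun hh => hcd (Nat.cast_injective hh)
          rw [if_neg hcd, pendAny, pendAny, if_pos hd, if_neg hck]
          rcases hgs : (((c, k) :: gs).any predN)
          · simp only [hgs, Bool.or_false, decide_eq_decide]
            omega
          · simp [hgs]
      · rw [aListN_cons_ne d t cur count hd, ih, h]
        by_cases hcd : c = d
        · subst hcd
          rw [if_pos rfl, pendAny, pendAny, if_pos rfl, if_neg hd]
          rcases hgs : gs.any predN
          · simp only [List.any_cons, hgs, predN, Bool.or_false, ← Bool.decide_and,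
              ← Bool.decide_or, decide_eq_decide]
            omega
          · simp [hgs]
        · have hck : ((c : Int)) ≠ (d : Int) := by
            exact_mod_cast fun hh => hcd (Nat.cast_injective hh)
          rw [if_neg hcd, pendAny, pendAny, if_neg hck, if_neg hd]
          rcases hgs : (((c, k) :: gs).any predN)
          · simp only [List.any_cons, hgs, predN, Bool.or_false, ← Bool.decide_and,
              ← Bool.decide_or, decide_eq_decide]
            omega
          · simp [hgs]

lemma subLoopA_succ_eq (f : Nat) (disk cur count : Int) (hne : disk ≠ 0)
    (hd : PySem.Int.mod disk 10 = cur) :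
    subLoopA (f + 1) disk cur count
      = (decide (cur = count + 1) || subLoopA f (PySem.Int.floordiv disk 10) cur (count + 1)) := by
  simp only [subLoopA, hd, if_pos hne, eq_self_iff_true, if_true, Bool.if_true_left]

lemma subLoopA_succ_ne (f : Nat) (disk cur count : Int) (hne : disk ≠ 0)
    (hd : PySem.Int.mod disk 10 ≠ cur) :
    subLoopA (f + 1) disk cur count
      = (decide (PySem.Int.mod disk 10 = 1)
          || subLoopA f (PySem.Int.floordiv disk 10) (PySem.Int.mod disk 10) 1) := by
  simp only [subLoopA, if_pos hne, if_neg hd, Bool.if_true_left]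

lemma subLoopA_eq_aListN : ∀ (fuel m : Nat) (cur count : Int), m ≤ fuel →
    subLoopA fuel (m : Int) cur count = aListN (Nat.digits 10 m) cur count := by
  intro fuel
  induction fuel with
  | zero => intro m cur count hm
            interval_cases m
            rfl
  | succ f ih =>
    intro m cur count hm
    rcases Nat.eq_zero_or_pos m with rfl | hpos
    · rfl
    · rw [Nat.digits_def' (by norm_num : 1 < 10) hpos]
      have hmod : PySem.Int.mod (m : Int) 10 = ((m % 10 : Nat) : Int) := by
        exact_mod_cast PySem.Int.mod_natCast m 10
      have hdiv : PySem.Int.floordiv (m : Int) 10 = ((m / 10 : Nat) : Int) := by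
        exact_mod_cast PySem.Int.floordiv_natCast m 10
      have hne : ((m : Int)) ≠ 0 := by exact_mod_cast Nat.pos_iff_ne_zero.mp hpos
      have hrec : m / 10 ≤ f := by
        have := Nat.div_lt_self hpos (by norm_num : 1 < 10); omega
      by_cases he : ((m % 10 : Nat) : Int) = cur
      · rw [subLoopA_succ_eq f _ cur count hne (by rw [hmod, he]),
          aListN_cons_eq _ _ cur count he, hdiv, ih _ _ _ hrec]
      · rw [subLoopA_succ_ne f _ cur count hne (by rw [hmod]; exact he),
          aListN_cons_ne _ _ cur count he, hdiv, hmod, ih _ _ _ hrec]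

lemma subsaltshaker_eq_any (m : Nat) (hm : 0 < m) :
    subsaltshaker (m : Int) = (rleN (Nat.digits 10 m)).any predN := by
  have hmod : PySem.Int.mod (m : Int) 10 = ((m % 10 : Nat) : Int) := by
    exact_mod_cast PySem.Int.mod_natCast m 10
  have habs : ((m : Int)).natAbs = m := Int.natAbs_natCast m
  rw [subsaltshaker, habs, hmod, subLoopA_eq_aListN (m + 11) m _ _ (by omega),
    aListN_eq_pendAny, Nat.digits_def' (by norm_num : 1 < 10) hm]
  obtain ⟨k, gs, hrle, hk⟩ := rleN_head (m % 10) (Nat.digits 10 (m / 10))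
  rw [hrle, pendAny, if_pos rfl]
  rcases hgs : gs.any predN
  · simp only [List.any_cons, hgs, predN, Bool.or_false, ← Bool.decide_and, decide_eq_decide]
    omega
  · simp [hgs]

lemma toDigits_eq (m : Nat) (hm : 0 < m) :
    Nat.toDigits 10 m = ((Nat.digits 10 m).map Nat.digitChar).reverse := by
  induction m using Nat.strong_induction_on with
  | _ m ih =>
    by_cases h10 : m < 10
    · rw [Nat.toDigits_of_lt_base h10, Nat.digits_def' (by norm_num : 1 < 10) hm,
        Nat.mod_eq_of_lt h10, Nat.div_eq_of_lt h10]
      simp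
    · rw [Nat.toDigits_of_base_le (by norm_num : 1 < 10) (by omega),
        Nat.digits_def' (by norm_num : 1 < 10) hm,
        ih (m / 10) (Nat.div_lt_self hm (by norm_num)) (by omega)]
      simp

lemma foldr_bStep_map : ∀ (l : List Nat), (∀ x ∈ l, x < 10) →
    List.foldr (fun ch gs => bStep gs ch) [] (l.map Nat.digitChar)
      = (rleN l).map (fun p => (Nat.digitChar p.1, p.2)) := by
  intro l
  induction l with
  | nil => intro _; rfl
  | cons d t ih =>
    intro h
    have hd10 : d < 10 := h d (by simp)
    have ht : ∀ x ∈ t, x < 10 := fun x hx => h x (by simp [hx])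
    simp only [List.map_cons, List.foldr_cons, ih ht]
    rcases hr : rleN t with _ | ⟨⟨c, k⟩, gs⟩
    · simp [bStep, rleN, hr]
    · have hc10 : c < 10 := ht c (rleN_mem_digits t (c, k) (by rw [hr]; simp))
      have hinj := (digit_facts c hc10).1 d hd10
      simp only [rleN, hr, List.map_cons, bStep]
      by_cases hcd : c = d
      · rw [if_pos ((hinj.mpr hcd)), if_pos hcd]
        simp
      · rw [if_neg (fun hh => hcd (hinj.mp hh)), if_neg hcd]
        simp

lemma subsaltshaker_alt_eq_any (m : Nat) (hm : 0 < m) :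
    subsaltshaker_alt (m : Int) = (rleN (Nat.digits 10 m)).any predN := by
  have hts : (PySem.Int.toStr (m : Int)).toList = Nat.toDigits 10 m := by
    rw [PySem.Int.toList_toStr, PySem.Int.toChars, if_neg (by omega), Int.toNat_natCast]
  simp only [subsaltshaker_alt, hts, toDigits_eq m hm, List.foldl_reverse]
  rw [foldr_bStep_map _ (fun x hx => Nat.digits_lt_base (by norm_num) hx)]
  rw [List.any_reverse, List.any_map]
  have key : ∀ p ∈ rleN (Nat.digits 10 m),
      ((fun p => PySem.Chars.isdigit p.1 &&
        (decide (1 ≤ (PySem.Int.ofChars? [p.1]).getD 0) &&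
         decide ((PySem.Int.ofChars? [p.1]).getD 0 ≤ p.2)))
          ∘ (fun p => (Nat.digitChar p.1, p.2))) p = predN p := by
    intro p hp
    have hp10 : p.1 < 10 :=
      Nat.digits_lt_base (by norm_num) (rleN_mem_digits _ _ hp)
    obtain ⟨_, hdig, hof⟩ := digit_facts p.1 hp10
    simp only [Function.comp, hdig, hof, predN, Option.getD_some, Bool.true_and]
  rw [Bool.eq_iff_iff]
  simp only [List.any_eq_true]
  exact ⟨fun ⟨x, hx, hpx⟩ => ⟨x, hx, (key x hx) ▸ hpx⟩,
    fun ⟨x, hx, hqx⟩ => ⟨x, hx, (key x hx).symm ▸ hqx⟩⟩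

-- ===== VERDICT (by name: the statement is the Claim_ definition above) =====
theorem subsaltshaker_spec : Claim_equal_subsaltshaker := by
  intro disk _ hpre
  unfold Spec_subsaltshaker
  obtain ⟨m, rfl⟩ : ∃ m : Nat, disk = (m : Int) := ⟨disk.toNat, (Int.toNat_of_nonneg hpre).symm⟩
  rcases Nat.eq_zero_or_pos m with rfl | hm
  · decide
  · rw [subsaltshaker_eq_any m hm, subsaltshaker_alt_eq_any m hm]
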